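-- pv_equiv track=rewrite | github.com/sanjaynesan-05/AI-Powered-Study-Assistant | backend/python-ai-service/agents/learning_agent.py | _calculate_study_time
-- ===== SOURCE A (Python) =====
-- from typing import Dict, List, Any
--
-- def _calculate_study_time(resources: List[Dict]) -> str:
--     """Calculate estimated study time based on resource types."""
--     total_minutes = 0
--
--     for resource in resources:
--         resource_type = resource.get('type', '').lower()
--         if resource_type == 'video':
--             total_minutes += 45  # Average educational video
--         elif resource_type == 'tutorial':
--             total_minutes += 90  # Hands-on tutorial
--         elif resource_type == 'documentation':
--             total_minutes += 60  # Reading documentation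
--         elif resource_type == 'course':
--             total_minutes += 180  # Course section
--         else:
--             total_minutes += 30  # Article/other
--
--     hours = total_minutes // 60
--     minutes = total_minutes % 60
--
--     if hours == 0:
--         return f"{minutes} minutes"
--     elif minutes == 0:
--         return f"{hours} hours"
--     else:
--         return f"{hours}h {minutes}m"
-- ===== SOURCE B (Python) =====
-- from typing import Dict, List, Any
--
-- _MINUTES = {'video': 45, 'tutorial': 90, 'documentation': 60, 'course': 180}
--
-- def _calculate_study_time(resources: List[Dict]) -> str:
--     """Group resources by lowercased type, then take a weighted sum over distinct types."""
--     counts = {}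
--     for r in resources:
--         t = r.get('type', '').lower()
--         counts[t] = counts.get(t, 0) + 1
--     total_minutes = sum(n * _MINUTES.get(t, 30) for t, n in counts.items())
--     hours, minutes = divmod(total_minutes, 60)
--     if hours == 0:
--         return f"{minutes} minutes"
--     if minutes == 0:
--         return f"{hours} hours"
--     return f"{hours}h {minutes}m"
-- ===== Notes on version B (the rewrite author's own statement) =====
-- stated objective: alternative
-- what changed: Replaces A's per-resource if/elif branch cascade with a group-then-weighted-sum: one pass builds a dict of counts of lowercased types, then the total is a weighted sum over the distinct types using a minutes table with default 30; the formatting tail uses divmod.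
import Mathlib
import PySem

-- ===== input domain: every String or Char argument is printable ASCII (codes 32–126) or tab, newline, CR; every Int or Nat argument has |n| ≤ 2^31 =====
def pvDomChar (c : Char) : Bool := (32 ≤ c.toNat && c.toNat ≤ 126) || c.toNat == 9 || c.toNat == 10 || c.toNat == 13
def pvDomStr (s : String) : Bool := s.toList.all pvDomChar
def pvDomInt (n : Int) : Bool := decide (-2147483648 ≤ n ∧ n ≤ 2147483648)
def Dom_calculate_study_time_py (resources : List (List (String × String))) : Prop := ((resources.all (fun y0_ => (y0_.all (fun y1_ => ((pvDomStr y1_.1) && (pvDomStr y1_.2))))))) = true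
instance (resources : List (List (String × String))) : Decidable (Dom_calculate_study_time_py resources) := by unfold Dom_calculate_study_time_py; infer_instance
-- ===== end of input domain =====

-- B replaces A's per-resource if/elif cascade by grouping: count distinct lowercased types once,
-- then take a weighted sum over the distinct types via a minutes table (alternative decomposition, same cost).

-- ===== PORT A =====
def calculate_study_time_py (resources : List (List (String × String))) : String :=
  let total_minutes : Int := resources.foldl (fun total_minutes resource =>
    let resource_type := PySem.Str.lower ((PySem.Dict.mk resource).getD "type" "")
    if resource_type = "video" then total_minutes + 45
    else if resource_type = "tutorial" then total_minutes + 90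
    else if resource_type = "documentation" then total_minutes + 60
    else if resource_type = "course" then total_minutes + 180
    else total_minutes + 30) 0
  let hours := PySem.Int.floordiv total_minutes 60
  let minutes := PySem.Int.mod total_minutes 60
  if hours = 0 then PySem.Int.toStr minutes ++ " minutes"
  else if minutes = 0 then PySem.Int.toStr hours ++ " hours"
  else PySem.Int.toStr hours ++ "h " ++ PySem.Int.toStr minutes ++ "m"

-- ===== PORT B =====
def pvMinutesTable : PySem.Dict String Int :=
  PySem.Dict.ofList [("video", 45), ("tutorial", 90), ("documentation", 60), ("course", 180)]

def calculate_study_time_py_alt (resources : List (List (String × String))) : String :=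
  let counts := resources.foldl (fun counts r =>
    let t := PySem.Str.lower ((PySem.Dict.mk r).getD "type" "")
    counts.insert t (counts.getD t 0 + 1)) PySem.Dict.empty
  let total_minutes : Int := (counts.items.map (fun p => p.2 * pvMinutesTable.getD p.1 30)).sum
  let hours := PySem.Int.floordiv total_minutes 60
  let minutes := PySem.Int.mod total_minutes 60
  if hours = 0 then PySem.Int.toStr minutes ++ " minutes"
  else if minutes = 0 then PySem.Int.toStr hours ++ " hours"
  else PySem.Int.toStr hours ++ "h " ++ PySem.Int.toStr minutes ++ "m"

-- ===== PRECONDITION & SPEC =====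
def Spec_calculate_study_time_py (resources : List (List (String × String))) (out : String) : Prop := out = calculate_study_time_py_alt resources
instance (resources : List (List (String × String))) (out : String) : Decidable (Spec_calculate_study_time_py resources out) := by unfold Spec_calculate_study_time_py; infer_instance

-- ===== CLAIM (what is proved, stated in full; the proofs are below) =====
def Claim_equal_calculate_study_time_py : Prop := ∀ (resources : List (List (String × String))), Dom_calculate_study_time_py resources → Spec_calculate_study_time_py resources (calculate_study_time_py resources)

-- ===== LEMMAS AND PROOFS =====

-- the lowercased type of one resource
def pvTypeOf (r : List (String × String)) : String :=
  PySem.Str.lower ((PySem.Dict.mk r).getD "type" "")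

-- A's branch cascade equals the table lookup with default 30
lemma pvBranch_eq_table (t : String) :
    (if t = "video" then (45 : Int)
     else if t = "tutorial" then 90
     else if t = "documentation" then 60
     else if t = "course" then 180
     else 30) = pvMinutesTable.getD t 30 := by
  have hmk : pvMinutesTable = PySem.Dict.mk
      [("video", 45), ("tutorial", 90), ("documentation", 60), ("course", 180)] := by decide
  rw [hmk]
  simp only [PySem.Dict.getD_eq_get?_getD, PySem.Dict.get?_mk_cons, beq_iff_eq]
  by_cases h1 : t = "video"
  · subst h1; decide
  · by_cases h2 : t = "tutorial"
    · subst h2; decide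
    · by_cases h3 : t = "documentation"
      · subst h3; decide
      · by_cases h4 : t = "course"
        · subst h4; decide
        · rw [if_neg h1, if_neg h2, if_neg h3, if_neg h4,
            if_neg (fun h => h1 h.symm), if_neg (fun h => h2 h.symm),
            if_neg (fun h => h3 h.symm), if_neg (fun h => h4 h.symm)]
          rfl

-- A's foldl is the sum of the per-resource weights
lemma pvFoldA (l : List (List (String × String))) : ∀ (acc : Int),
    l.foldl (fun total_minutes resource =>
      let resource_type := PySem.Str.lower ((PySem.Dict.mk resource).getD "type" "")
      if resource_type = "video" then total_minutes + 45
      else if resource_type = "tutorial" then total_minutes + 90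
      else if resource_type = "documentation" then total_minutes + 60
      else if resource_type = "course" then total_minutes + 180
      else total_minutes + 30) acc
    = acc + ((l.map pvTypeOf).map (fun t => pvMinutesTable.getD t 30)).sum := by
  induction l with
  | nil => intro acc; simp
  | cons r l ih =>
      intro acc
      simp only [List.foldl_cons, List.map_cons, List.sum_cons, ih]
      rw [← pvBranch_eq_table (pvTypeOf r)]
      simp only [pvTypeOf]
      split_ifs <;> ring

-- disjoint filters split a weighted sum
lemma pvSum_filter_or (w : String → Int) (p q : String → Bool)
    (hdisj : ∀ t, ¬(p t = true ∧ q t = true)) :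
    ∀ l : List String,
      ((l.filter (fun t => p t || q t)).map w).sum
        = ((l.filter p).map w).sum + ((l.filter q).map w).sum := by
  intro l
  induction l with
  | nil => simp
  | cons x l ih =>
      by_cases hp : p x = true
      · have hq : q x = false := by
          have := hdisj x; cases hqx : q x
          · rfl
          · exact absurd ⟨hp, hqx⟩ this
        simp [hp, hq, ih]; ring
      · cases hq : q x
        · simp [hp, hq, ih]
        · simp [hp, hq, ih]; ring

-- the sum of w over copies of s is count * w s
lemma pvSum_filter_eq (w : String → Int) (s : String) :
    ∀ l : List String, ((l.filter (fun t => t == s)).map w).sum = (l.count s : Int) * w s := by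
  intro l
  induction l with
  | nil => simp
  | cons x l ih =>
      by_cases hx : x = s
      · subst hx; simp [List.count_cons, ih]; ring
      · simp [List.count_cons, hx, ih]

-- weighted sum over any nodup list of keys = weighted sum over the filtered multiset
lemma pvKey (w : String → Int) : ∀ (S : List String), S.Nodup → ∀ (l : List String),
    (S.map (fun t => (l.count t : Int) * w t)).sum
      = ((l.filter (fun t => decide (t ∈ S))).map w).sum := by
  intro S
  induction S with
  | nil => intro _ l; simp
  | cons s S ih =>
      intro hnd l
      have hs : s ∉ S := (List.nodup_cons.mp hnd).1
      have hndS : S.Nodup := (List.nodup_cons.mp hnd).2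
      calc (((s :: S)).map (fun t => (l.count t : Int) * w t)).sum
          = (l.count s : Int) * w s + (S.map (fun t => (l.count t : Int) * w t)).sum := by simp
        _ = ((l.filter (fun t => t == s)).map w).sum + ((l.filter (fun t => decide (t ∈ S))).map w).sum := by
              rw [pvSum_filter_eq, ih hndS]
        _ = ((l.filter (fun t => (t == s) || decide (t ∈ S))).map w).sum := by
              rw [pvSum_filter_or w (fun t => t == s) (fun t => decide (t ∈ S))]
              intro t ht
              have h1 : t = s := by simpa using ht.1
              have h2 : t ∈ S := by simpa using ht.2
              exact hs (h1 ▸ h2)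
        _ = ((l.filter (fun t => decide (t ∈ s :: S))).map w).sum := by
              have hfc : l.filter (fun t => decide (t ∈ s :: S))
                  = l.filter (fun t => (t == s) || decide (t ∈ S)) :=
                List.filter_congr (fun x _ => by by_cases h : x = s <;> simp [List.mem_cons, h])
              rw [hfc]

-- B's counter total equals the plain per-element total
lemma pvTotals_eq (l : List String) :
    (((PySem.Dict.counter l).items).map (fun p => p.2 * pvMinutesTable.getD p.1 30)).sum
      = (l.map (fun t => pvMinutesTable.getD t 30)).sum := by
  rw [PySem.Dict.items_counter]
  rw [List.map_map]
  have : ((PySem.Set.ofList l).map ((fun p : String × Int => p.2 * pvMinutesTable.getD p.1 30) ∘ fun k => (k, (l.count k : Int)))).sum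
      = ((PySem.Set.ofList l).map (fun t => (l.count t : Int) * pvMinutesTable.getD t 30)).sum := rfl
  rw [this, pvKey (fun t => pvMinutesTable.getD t 30) _ (PySem.Set.nodup_ofList l) l]
  have hfil : l.filter (fun t => decide (t ∈ PySem.Set.ofList l)) = l := by
    apply List.filter_eq_self.mpr
    intro t ht
    simpa [PySem.Set.mem_ofList] using ht
  rw [hfil]

-- ===== VERDICT (by name: the statement is the Claim_ definition above) =====
theorem calculate_study_time_py_spec : Claim_equal_calculate_study_time_py := by
  intro resources _
  show calculate_study_time_py resources = calculate_study_time_py_alt resources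
  unfold calculate_study_time_py calculate_study_time_py_alt
  have hcounts : resources.foldl (fun counts r =>
      let t := PySem.Str.lower ((PySem.Dict.mk r).getD "type" "")
      counts.insert t (counts.getD t 0 + 1)) PySem.Dict.empty
      = PySem.Dict.counter (resources.map pvTypeOf) := by
    rw [← PySem.Dict.foldl_insert_getD_add_one_eq_counter, List.foldl_map]
    rfl
  simp only [hcounts, pvFoldA, pvTotals_eq, zero_add]
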